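-- pv_equiv track=rewrite | github.com/KingOfTheAce2/BEAR_AI | installer/BEAR_AI_Portable/src/bear_ai/pii/legal_recognizers.py | _has_legal_context
-- ===== SOURCE A (Python) =====
-- def _has_legal_context(text: str, start: int, end: int) -> bool:
--     """Check if a person name appears in a legal context."""
--     context_window = 50
--     context_start = max(0, start - context_window)
--     context_end = min(len(text), end + context_window)
--     context = text[context_start:context_end].lower()
--
--     legal_context_indicators = [
--         "attorney", "lawyer", "counsel", "judge", "justice", "esq",
--         "court", "bar", "legal", "law", "representing", "counsel for"
--     ]
--
--     return any(indicator in context for indicator in legal_context_indicators)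
-- ===== SOURCE B (Python) =====
-- def _has_legal_context(text: str, start: int, end: int) -> bool:
--     """Check if a person name appears in a legal context."""
--     keywords = [
--         "attorney", "lawyer", "counsel", "judge", "justice", "esq",
--         "court", "bar", "legal", "law", "representing", "counsel for",
--     ]
--     lo = max(0, start - 50)
--     hi = min(len(text), end + 50)
--     window = text[lo:hi].lower()
--     # Single left-to-right pass; `pending` holds the remaining suffixes of all
--     # keywords whose already-matched prefix ends at the current position.
--     pending = []
--     for ch in window:
--         nxt = []
--         for k in pending + keywords:
--             if k[0] == ch:
--                 if len(k) == 1: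
--                     return True
--                 nxt.append(k[1:])
--         pending = nxt
--     return False
-- ===== Notes on version B (the rewrite author's own statement) =====
-- stated objective: alternative
-- what changed: Replaced the per-indicator substring tests (any 'k in context') by a single left-to-right pass over the window that simulates a multi-pattern NFA: a set of live partial matches (remaining keyword suffixes) is advanced one character at a time, reporting a match the moment any keyword completes.
import Mathlib
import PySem

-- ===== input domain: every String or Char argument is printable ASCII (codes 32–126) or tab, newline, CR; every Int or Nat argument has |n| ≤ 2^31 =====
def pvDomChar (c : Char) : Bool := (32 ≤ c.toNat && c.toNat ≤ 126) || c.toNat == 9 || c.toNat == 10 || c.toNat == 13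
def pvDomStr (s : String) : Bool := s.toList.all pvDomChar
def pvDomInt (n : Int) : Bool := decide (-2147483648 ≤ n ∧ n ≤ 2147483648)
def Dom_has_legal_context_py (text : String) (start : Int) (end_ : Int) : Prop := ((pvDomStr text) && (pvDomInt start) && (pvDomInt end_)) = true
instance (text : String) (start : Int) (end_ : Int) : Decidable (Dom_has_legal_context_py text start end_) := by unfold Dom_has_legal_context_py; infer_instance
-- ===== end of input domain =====

-- B replaces A's per-indicator substring tests by one left-to-right pass over the
-- window simulating a multi-pattern NFA (a set of live keyword-suffix partial
-- matches advanced per character); objective: alternative.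

-- ===== PORT A =====
def has_legal_context_py (text : String) (start : Int) (end_ : Int) : Bool :=
  let context_window : Int := 50
  let context_start : Int := max 0 (start - context_window)
  let context_end : Int := min (PySem.Str.len text) (end_ + context_window)
  let context : String := PySem.Str.lower (PySem.Str.slice text (some context_start) (some context_end))
  let legal_context_indicators : List String :=
    ["attorney", "lawyer", "counsel", "judge", "justice", "esq",
     "court", "bar", "legal", "law", "representing", "counsel for"]
  legal_context_indicators.any (fun indicator => PySem.Str.isIn indicator context)

-- ===== PORT B =====
-- inner loop of Source B: advance every candidate (pending + keywords) by character c;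
-- `none` encodes Source B's early `return True` (some keyword just completed)
def pvAdvance (c : Char) : List (List Char) → Option (List (List Char))
  | [] => some []
  | [] :: ks => pvAdvance c ks          -- unreachable: candidates are nonempty
  | (x :: xs) :: ks =>
      if x = c then
        if xs = [] then none
        else (pvAdvance c ks).map (fun l => xs :: l)
      else pvAdvance c ks

-- outer loop of Source B: one pass over the window characters with state `pending`
def pvScan (kw : List (List Char)) : List (List Char) → List Char → Bool
  | _, [] => false
  | pending, c :: rest =>
      match pvAdvance c (pending ++ kw) with
      | none => true
      | some nxt => pvScan kw nxt rest

def has_legal_context_py_alt (text : String) (start : Int) (end_ : Int) : Bool :=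
  let keywords : List String :=
    ["attorney", "lawyer", "counsel", "judge", "justice", "esq",
     "court", "bar", "legal", "law", "representing", "counsel for"]
  let lo : Int := max 0 (start - 50)
  let hi : Int := min (PySem.Str.len text) (end_ + 50)
  let window : String := PySem.Str.lower (PySem.Str.slice text (some lo) (some hi))
  pvScan (keywords.map String.toList) [] window.toList

-- ===== PRECONDITION & SPEC =====
def Spec_has_legal_context_py (text : String) (start : Int) (end_ : Int) (out : Bool) : Prop := out = has_legal_context_py_alt text start end_
instance (text : String) (start : Int) (end_ : Int) (out : Bool) : Decidable (Spec_has_legal_context_py text start end_ out) := by unfold Spec_has_legal_context_py; infer_instance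

-- ===== CLAIM =====
def Claim_equal_has_legal_context_py : Prop := ∀ (text : String) (start : Int) (end_ : Int), Dom_has_legal_context_py text start end_ → Spec_has_legal_context_py text start end_ (has_legal_context_py text start end_)

-- ===== LEMMAS AND PROOFS =====

lemma pvAdvance_none_iff (c : Char) (ks : List (List Char)) :
    pvAdvance c ks = none ↔ [c] ∈ ks := by
  induction ks with
  | nil => simp [pvAdvance]
  | cons k ks ih =>
    match k with
    | [] => simpa [pvAdvance] using ih
    | x :: xs =>
      by_cases hx : x = c
      · subst hx
        by_cases hxs : xs = []
        · subst hxs; simp [pvAdvance]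
        · rw [pvAdvance, if_pos rfl, if_neg hxs]
          simp only [Option.map_eq_none_iff, ih, List.mem_cons]
          constructor
          · exact Or.inr
          · rintro (h | h)
            · injection h with _ h2; exact absurd h2.symm hxs
            · exact h
      · have hne : ([c] : List Char) ≠ x :: xs := by
          intro h; injection h with h1 _; exact hx h1.symm
        rw [pvAdvance, if_neg hx]
        simp [ih, hne]

lemma pvAdvance_some_mem (c : Char) (ks l : List (List Char))
    (h : pvAdvance c ks = some l) (q : List Char) :
    q ∈ l ↔ (c :: q) ∈ ks := by
  induction ks generalizing l with
  | nil => simp [pvAdvance] at h; subst h; simp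
  | cons k ks ih =>
    match k with
    | [] =>
      rw [pvAdvance] at h
      simp [ih l h]
    | x :: xs =>
      by_cases hx : x = c
      · subst hx
        by_cases hxs : xs = []
        · subst hxs; simp [pvAdvance] at h
        · rw [pvAdvance, if_pos rfl, if_neg hxs] at h
          rcases Option.map_eq_some_iff.mp h with ⟨l', hl', rfl⟩
          simp [ih l' hl']
      · rw [pvAdvance, if_neg hx] at h
        have hne : (c :: q) ≠ x :: xs := by
          intro he; injection he with h1 _; exact hx h1.symm
        simp [ih l h, hne]

lemma pvScan_iff (kw : List (List Char)) (rest : List Char) (pending : List (List Char))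
    (hp : ∀ p ∈ pending, p ≠ []) (hk : ∀ k ∈ kw, k ≠ []) :
    pvScan kw pending rest = true ↔
      (∃ p ∈ pending, p <+: rest) ∨ (∃ i, ∃ k ∈ kw, k <+: rest.drop i) := by
  induction rest generalizing pending with
  | nil =>
    rw [pvScan]
    constructor
    · intro h; cases h
    · rintro (⟨p, hpm, hpre⟩ | ⟨i, k, hkm, hpre⟩)
      · exact absurd (List.prefix_nil.mp hpre) (hp p hpm)
      · exact absurd (List.prefix_nil.mp (by simpa using hpre)) (hk k hkm)
  | cons c rest ih =>
    cases hadv : pvAdvance c (pending ++ kw) with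
    | none =>
      refine iff_of_true (by rw [pvScan, hadv]) ?_
      rcases List.mem_append.mp ((pvAdvance_none_iff c _).mp hadv) with h | h
      · exact Or.inl ⟨[c], h, by simp⟩
      · exact Or.inr ⟨0, [c], h, by simp⟩
    | some nxt =>
      have hmem := pvAdvance_some_mem c _ _ hadv
      have hnxt : ∀ q ∈ nxt, q ≠ [] := by
        intro q hq hq0
        subst hq0
        have : pvAdvance c (pending ++ kw) = none :=
          (pvAdvance_none_iff c _).mpr ((hmem []).mp hq)
        rw [hadv] at this; cases this
      have hstep : pvScan kw pending (c :: rest) = pvScan kw nxt rest := by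
        rw [pvScan, hadv]
      rw [hstep, ih nxt hnxt]
      constructor
      · rintro (⟨q, hq, hpre⟩ | ⟨i, k, hkm, hpre⟩)
        · rcases List.mem_append.mp ((hmem q).mp hq) with h | h
          · exact Or.inl ⟨c :: q, h, by simpa [List.cons_prefix_cons] using hpre⟩
          · exact Or.inr ⟨0, c :: q, h, by simpa [List.cons_prefix_cons] using hpre⟩
        · exact Or.inr ⟨i + 1, k, hkm, by simpa using hpre⟩
      · rintro (⟨p, hpm, hpre⟩ | ⟨i, k, hkm, hpre⟩)
        · obtain ⟨x, q, rfl⟩ : ∃ x q, p = x :: q := by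
            cases p with
            | nil => exact absurd rfl (hp [] hpm)
            | cons x q => exact ⟨x, q, rfl⟩
          rcases List.cons_prefix_cons.mp hpre with ⟨rfl, hq⟩
          exact Or.inl ⟨q, (hmem q).mpr (List.mem_append.mpr (Or.inl hpm)), hq⟩
        · cases i with
          | zero =>
            obtain ⟨x, q, rfl⟩ : ∃ x q, k = x :: q := by
              cases k with
              | nil => exact absurd rfl (hk [] hkm)
              | cons x q => exact ⟨x, q, rfl⟩
            rcases List.cons_prefix_cons.mp (by simpa using hpre) with ⟨rfl, hq⟩
            exact Or.inl ⟨q, (hmem q).mpr (List.mem_append.mpr (Or.inr hkm)), hq⟩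
          | succ i => exact Or.inr ⟨i, k, hkm, by simpa using hpre⟩

lemma core (kws : List String) (hk : ∀ k ∈ kws, k.toList ≠ []) (c : String) :
    kws.any (fun indicator => PySem.Str.isIn indicator c) =
    pvScan (kws.map String.toList) [] c.toList := by
  rw [Bool.eq_iff_iff]
  rw [pvScan_iff _ _ _ (by simp) (by simpa using hk)]
  simp only [List.any_eq_true, PySem.Str.isIn_eq, List.not_mem_nil, false_and, exists_false,
    false_or, List.mem_map]
  constructor
  · rintro ⟨k, hkm, hin⟩
    obtain ⟨j, hj⟩ := (PySem.Chars.exists_prefix_drop_iff_isIn _ _).mpr hin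
    exact ⟨j, k.toList, ⟨k, hkm, rfl⟩, hj⟩
  · rintro ⟨i, k', ⟨k, hkm, rfl⟩, hpre⟩
    exact ⟨k, hkm, (PySem.Chars.exists_prefix_drop_iff_isIn _ _).mp ⟨i, hpre⟩⟩

-- ===== VERDICT =====
theorem has_legal_context_py_spec : Claim_equal_has_legal_context_py := by
  intro text start end_ _
  unfold Spec_has_legal_context_py has_legal_context_py has_legal_context_py_alt
  exact core _ (by decide) _
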